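-- pv_equiv track=rewrite | github.com/MarcosBianchii/Teoria-de-Algoritmos | guias/reducciones/20.py | verificador_path_selection
-- ===== SOURCE A (Python) =====
-- def verificador_path_selection(grafo, pedidos, k, elegidos):
--     """
--     La complejidad del algoritmo es O(l * e^2) donde l es el largo del camino más largo.
--     """
--     if len(elegidos) < k:
--         return False
--
--     # O(e)
--     if any(p not in pedidos for p in elegidos):
--         return False
--
--     # O(l * e)
--     conjuntos = [set(e) for e in elegidos]
--
--     # O(l * e^2)
--     for i in range(len(elegidos)):
--         for j in range(i + 1, len(conjuntos)):
--             if any(v in conjuntos[j] for v in elegidos[i]):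
--                 return False
--
--     return True
-- ===== SOURCE B (Python) =====
-- def verificador_path_selection(grafo, pedidos, k, elegidos):
--     if len(elegidos) < k:
--         return False
--
--     if any(p not in pedidos for p in elegidos):
--         return False
--
--     # Cardinality check: the paths are pairwise vertex-disjoint
--     # iff no vertex is counted twice, i.e. the sum of the per-path
--     # distinct-vertex counts equals the size of their union.
--     total = 0
--     union = set()
--     for e in elegidos:
--         s = set(e)
--         total += len(s)
--         union |= s
--     return total == len(union)
-- ===== Notes on version B (the rewrite author's own statement) =====
-- stated objective: alternative
-- what changed: Replaces the nested pairwise-intersection loops with a single pass that compares the sum of per-path distinct-vertex counts against the size of their union (equal iff the paths are pairwise disjoint).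
import Mathlib
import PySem

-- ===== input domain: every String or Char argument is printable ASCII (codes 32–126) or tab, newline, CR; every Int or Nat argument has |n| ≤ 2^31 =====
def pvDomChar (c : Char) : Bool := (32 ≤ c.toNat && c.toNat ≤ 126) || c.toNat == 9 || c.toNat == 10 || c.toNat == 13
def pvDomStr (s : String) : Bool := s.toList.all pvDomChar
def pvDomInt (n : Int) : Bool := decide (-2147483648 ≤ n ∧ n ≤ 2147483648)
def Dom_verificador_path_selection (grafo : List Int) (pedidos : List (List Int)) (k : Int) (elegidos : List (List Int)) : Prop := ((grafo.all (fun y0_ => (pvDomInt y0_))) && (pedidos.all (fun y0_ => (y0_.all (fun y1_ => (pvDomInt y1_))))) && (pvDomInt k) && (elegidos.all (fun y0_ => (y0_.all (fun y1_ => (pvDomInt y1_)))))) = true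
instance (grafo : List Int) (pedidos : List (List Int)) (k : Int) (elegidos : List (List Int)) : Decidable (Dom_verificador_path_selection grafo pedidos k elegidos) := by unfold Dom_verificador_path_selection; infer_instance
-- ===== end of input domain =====

-- B replaces A's nested pairwise-intersection loops by a single pass that compares the sum of
-- per-path distinct-vertex counts with the size of their union (equal iff pairwise disjoint).


-- ===== PORT A =====
-- any(v in conjuntos[j] for v in elegidos[i]) for one j
def pvAInner (e : List Int) (cs : List (PySem.Set Int)) : Bool :=
  cs.any (fun c => e.any (fun v => PySem.Set.contains c v))

-- the nested loops 'for i in range(len(elegidos)): for j in range(i+1, len(conjuntos)): …';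
-- elegidos[i] is paired with conjuntos[i+1:] (the two lists have equal length at the call)
def pvALoop : List (List Int) → List (PySem.Set Int) → Bool
  | [], _ => true
  | _ :: _, [] => true
  | e :: es, _ :: cs => if pvAInner e cs then false else pvALoop es cs

def verificador_path_selection (grafo : List Int) (pedidos : List (List Int)) (k : Int) (elegidos : List (List Int)) : Bool :=
  if (elegidos.length : Int) < k then false
  else if elegidos.any (fun p => !(pedidos.contains p)) then false
  else
    let conjuntos := elegidos.map (fun e => PySem.Set.ofList e)
    pvALoop elegidos conjuntos

-- ===== PORT B =====
def verificador_path_selection_alt (grafo : List Int) (pedidos : List (List Int)) (k : Int) (elegidos : List (List Int)) : Bool :=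
  if (elegidos.length : Int) < k then false
  else if elegidos.any (fun p => !(pedidos.contains p)) then false
  else
    let st := elegidos.foldl
      (fun (st : Int × PySem.Set Int) e =>
        let s := PySem.Set.ofList e
        (st.1 + PySem.Set.len s, PySem.Set.union st.2 s))
      (0, PySem.Set.empty)
    decide (st.1 = PySem.Set.len st.2)

-- ===== PRECONDITION & SPEC =====
def Spec_verificador_path_selection (grafo : List Int) (pedidos : List (List Int)) (k : Int) (elegidos : List (List Int)) (out : Bool) : Prop := out = verificador_path_selection_alt grafo pedidos k elegidos
instance (grafo : List Int) (pedidos : List (List Int)) (k : Int) (elegidos : List (List Int)) (out : Bool) : Decidable (Spec_verificador_path_selection grafo pedidos k elegidos out) := by unfold Spec_verificador_path_selection; infer_instance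

-- ===== CLAIM (what is proved, stated in full; the proofs are below) =====
def Claim_equal_verificador_path_selection : Prop := ∀ (grafo : List Int) (pedidos : List (List Int)) (k : Int) (elegidos : List (List Int)), Dom_verificador_path_selection grafo pedidos k elegidos → Spec_verificador_path_selection grafo pedidos k elegidos (verificador_path_selection grafo pedidos k elegidos)

-- ===== LEMMAS AND PROOFS =====

-- B's accumulation, checked against the growing union instead of against the later sets
def pvG : List (List Int) → PySem.Set Int → Bool
  | [], _ => true
  | e :: es, u =>
      (e.all (fun v => !(PySem.Set.contains u v))) && pvG es (PySem.Set.union u (PySem.Set.ofList e))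

theorem pv_disjoint_comm (a b : List Int) : (∀ v ∈ a, v ∉ b) ↔ (∀ v ∈ b, v ∉ a) := by
  constructor <;> exact fun h v hv hva => h v hva hv

theorem pvAInner_iff (e : List Int) (es : List (List Int)) :
    pvAInner e (es.map (fun x => PySem.Set.ofList x)) = true ↔ ∃ c ∈ es, ∃ v ∈ e, v ∈ c := by
  simp [pvAInner, List.any_eq_true, PySem.Set.mem_ofList]

theorem pvALoop_iff (es : List (List Int)) :
    pvALoop es (es.map (fun x => PySem.Set.ofList x)) = true ↔
      es.Pairwise (fun a b => ∀ v ∈ a, v ∉ b) := by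
  induction es with
  | nil => simp [pvALoop]
  | cons e es ih =>
      simp only [List.map_cons, pvALoop, List.pairwise_cons]
      cases h : pvAInner e (es.map (fun x => PySem.Set.ofList x)) with
      | true =>
          simp only [if_true]
          rw [pvAInner_iff] at h
          constructor
          · intro hf; exact absurd hf (by simp)
          · rintro ⟨hd, _⟩
            obtain ⟨c, hc, v, hv, hvc⟩ := h
            exact absurd (hd c hc v hv) (by simp [hvc])
      | false =>
          simp only [Bool.false_eq_true, if_false, ih]
          have h' : ¬ ∃ c ∈ es, ∃ v ∈ e, v ∈ c := by
            rw [← pvAInner_iff]; simp [h]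
          push_neg at h'
          constructor
          · intro hp
            exact ⟨fun b hb v hv => h' b hb v hv, hp⟩
          · rintro ⟨_, hp⟩; exact hp

theorem pvG_iff (es : List (List Int)) (u : PySem.Set Int) (hu : u.Nodup) :
    pvG es u = true ↔
      (∀ e ∈ es, ∀ v ∈ e, v ∉ u) ∧ es.Pairwise (fun a b => ∀ v ∈ a, v ∉ b) := by
  induction es generalizing u with
  | nil => simp [pvG]
  | cons e es ih =>
      simp only [pvG, Bool.and_eq_true, List.all_eq_true, Bool.not_eq_true',
        ← Bool.not_eq_true, PySem.Set.contains_iff]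
      rw [ih _ (PySem.Set.nodup_union _ _ hu)]
      simp only [List.pairwise_cons, List.mem_cons]
      constructor
      · rintro ⟨h1, h2, h3⟩
        refine ⟨?_, ?_, h3⟩
        · rintro f (rfl | hf) v hv
          · exact fun hvu => (h1 v hv) hvu
          · have := h2 f hf v hv
            rw [PySem.Set.mem_union] at this
            push_neg at this
            exact this.1
        · intro b hb
          rw [pv_disjoint_comm]
          intro v hv
          have := h2 b hb v hv
          rw [PySem.Set.mem_union, PySem.Set.mem_ofList] at this
          push_neg at this
          exact this.2
      · rintro ⟨h1, h2, h3⟩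
        refine ⟨fun v hv => h1 e (Or.inl rfl) v hv, ?_, h3⟩
        intro f hf v hv
        rw [PySem.Set.mem_union, PySem.Set.mem_ofList]
        push_neg
        refine ⟨h1 f (Or.inr hf) v hv, ?_⟩
        have := h2 f hf
        rw [pv_disjoint_comm] at this
        exact this v hv

theorem pv_len_union (u : PySem.Set Int) (s : PySem.Set Int) (hs : s.Nodup) :
    (PySem.Set.union u s).length
      = u.length + (s.filter (fun y => !(PySem.Set.contains u y))).length := by
  show (PySem.Set.update u s).length = _
  rw [PySem.Set.update_eq_append_filter, PySem.Set.ofList_eq_self_of_nodup _ hs,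
    List.length_append]

theorem pvFold_eq (es : List (List Int)) (u : PySem.Set Int) (t : Int)
    (hu : u.Nodup) (ht : (u.length : Int) ≤ t) :
    (decide ((es.foldl
        (fun (st : Int × PySem.Set Int) e =>
          (st.1 + PySem.Set.len (PySem.Set.ofList e),
           PySem.Set.union st.2 (PySem.Set.ofList e))) (t, u)).1
      = PySem.Set.len (es.foldl
        (fun (st : Int × PySem.Set Int) e =>
          (st.1 + PySem.Set.len (PySem.Set.ofList e),
           PySem.Set.union st.2 (PySem.Set.ofList e))) (t, u)).2))
    = (decide (t = (u.length : Int)) && pvG es u) := by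
  induction es generalizing u t with
  | nil => simp [pvG, PySem.Set.len]
  | cons e es ih =>
      simp only [List.foldl_cons, pvG]
      have hs : (PySem.Set.ofList e).Nodup := PySem.Set.nodup_ofList e
      have hlen := pv_len_union u (PySem.Set.ofList e) hs
      have hfle : ((PySem.Set.ofList e).filter (fun y => !(PySem.Set.contains u y))).length
          ≤ (PySem.Set.ofList e).length := List.length_filter_le _ _
      have hu' : (PySem.Set.union u (PySem.Set.ofList e)).Nodup :=
        PySem.Set.nodup_union _ _ hu
      have ht' : ((PySem.Set.union u (PySem.Set.ofList e)).length : Int)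
          ≤ t + PySem.Set.len (PySem.Set.ofList e) := by
        simp only [PySem.Set.len, hlen]
        push_cast
        omega
      refine (ih _ _ hu' ht').trans ?_
      have hkey : decide (t + PySem.Set.len (PySem.Set.ofList e)
            = ((PySem.Set.union u (PySem.Set.ofList e)).length : Int))
          = (decide (t = (u.length : Int)) && e.all (fun v => !(PySem.Set.contains u v))) := by
        have hall : (e.all (fun v => !(PySem.Set.contains u v)))
            = decide (((PySem.Set.ofList e).filter
                (fun y => !(PySem.Set.contains u y))).length = (PySem.Set.ofList e).length) := by
          rw [Bool.eq_iff_iff]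
          simp only [List.all_eq_true, decide_eq_true_eq, List.length_filter_eq_length_iff]
          simp [PySem.Set.mem_ofList]
        rw [hall, ← Bool.decide_and, Bool.eq_iff_iff]
        simp only [decide_eq_true_eq, PySem.Set.len, hlen]
        push_cast
        omega
      rw [hkey]
      rw [Bool.and_assoc]

theorem verificador_path_selection_eq (grafo : List Int) (pedidos : List (List Int)) (k : Int)
    (elegidos : List (List Int)) :
    verificador_path_selection grafo pedidos k elegidos
      = verificador_path_selection_alt grafo pedidos k elegidos := by
  unfold verificador_path_selection verificador_path_selection_alt
  by_cases h1 : (elegidos.length : Int) < k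
  · rw [if_pos h1, if_pos h1]
  · rw [if_neg h1, if_neg h1]
    by_cases h2 : elegidos.any (fun p => !(pedidos.contains p)) = true
    · rw [if_pos h2, if_pos h2]
    · rw [if_neg h2, if_neg h2]
      have hfold := pvFold_eq elegidos PySem.Set.empty 0 List.nodup_nil (by simp [PySem.Set.empty])
      simp only [show (PySem.Set.empty : PySem.Set Int) = [] from rfl] at hfold
      norm_num at hfold
      refine Eq.trans ?_ hfold.symm
      rw [Bool.eq_iff_iff, pvALoop_iff, pvG_iff _ _ List.nodup_nil]
      simp

-- ===== VERDICT (by name: the statement is the Claim_ definition above) =====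
theorem verificador_path_selection_spec : Claim_equal_verificador_path_selection := by
  intro grafo pedidos k elegidos _
  exact verificador_path_selection_eq grafo pedidos k elegidos
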